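-- pv_equiv track=rewrite | github.com/BlakePR/DeadlandsDiscordBot | Chips.py | list2str
-- ===== SOURCE A (Python) =====
-- def list2str(chipList):
--     chipDict = {}
--     for color in chipList:
--         chipDict[color] = chipDict.get(color, 0) + 1
--     chipStr = ""
--     for color, num in chipDict.items():
--         chipStr += str(num) + " " + color + " chips, "
--     chipStr = chipStr[:-2]
--     return chipStr
-- ===== SOURCE B (Python) =====
-- def list2str(chipList):
--     parts = []
--     work = chipList
--     while work:
--         color = work[0]
--         rest = [c for c in work if c != color]
--         parts.append(str(len(work) - len(rest)) + " " + color + " chips")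
--         work = rest
--     return ", ".join(parts)
-- ===== Notes on version B (the rewrite author's own statement) =====
-- stated objective: alternative
-- what changed: Instead of one pass accumulating counts in a dict and stripping a trailing separator, B loops by staged removal: it takes the first color of the remaining work list, removes every occurrence of it with a filter (the count is the length difference), collects that fragment, repeats on the shrunken remainder, and joins the fragments with ', '.join; this is asymptotically slower (O(u*n)) but structurally a different algorithm.
import Mathlib
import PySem

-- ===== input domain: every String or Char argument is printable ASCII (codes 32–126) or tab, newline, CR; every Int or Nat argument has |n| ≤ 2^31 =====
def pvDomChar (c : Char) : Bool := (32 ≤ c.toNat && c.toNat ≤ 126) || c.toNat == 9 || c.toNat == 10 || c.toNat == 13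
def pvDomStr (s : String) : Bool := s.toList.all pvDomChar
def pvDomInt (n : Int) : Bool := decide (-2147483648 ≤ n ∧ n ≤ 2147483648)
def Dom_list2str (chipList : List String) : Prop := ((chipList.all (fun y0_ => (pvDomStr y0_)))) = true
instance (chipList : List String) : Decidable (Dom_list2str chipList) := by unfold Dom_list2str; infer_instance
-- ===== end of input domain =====

-- B replaces A's single-pass dict-of-counts + trailing-separator strip by staged removal:
-- repeatedly take the first color of the remaining list, remove all its occurrences with a
-- filter (the count is the length difference), collect the fragments, and ", ".join them.


-- ===== PORT A =====
-- A's string concatenation is ported exactly on the List Char side (PySem.Int.toChars,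
-- ++ on char lists); the final chipStr[:-2] is PySem.List.slice with upper bound -2.
def list2str (chipList : List String) : String :=
  let chipDict : PySem.Dict String Int :=
    chipList.foldl (fun d color => d.insert color (d.getD color 0 + 1)) PySem.Dict.empty
  let chipStr : List Char :=
    chipDict.items.foldl
      (fun s p => s ++ PySem.Int.toChars p.2 ++ " ".toList ++ p.1.toList ++ " chips, ".toList) []
  String.ofList (PySem.List.slice chipStr none (some (-2)))

-- ===== PORT B =====
-- B's while loop over `work` is the structural recursion chipParts collecting the fragment
-- list `parts`; str concatenations are exact on the List Char side; ", ".join is PySem.Str.join.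
def chipParts : List String → List String
  | [] => []
  | color :: tl =>
    let rest := (color :: tl).filter (fun c => c != color)
    String.ofList (PySem.Int.toChars (((color :: tl).length - rest.length : Nat) : Int)
      ++ " ".toList ++ color.toList ++ " chips".toList) :: chipParts rest
termination_by l => l.length
decreasing_by
  simp only [List.filter_cons, bne_self_eq_false, List.length_cons]
  exact Nat.lt_succ_of_le (List.length_filter_le _ _)

def list2str_alt (chipList : List String) : String :=
  PySem.Str.join ", " (chipParts chipList)

-- ===== PRECONDITION & SPEC =====
def Spec_list2str (chipList : List String) (out : String) : Prop := out = list2str_alt chipList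
instance (chipList : List String) (out : String) : Decidable (Spec_list2str chipList out) := by unfold Spec_list2str; infer_instance

-- ===== CLAIM (what is proved, stated in full; the proofs are below) =====
def Claim_equal_list2str : Prop := ∀ (chipList : List String), Dom_list2str chipList → Spec_list2str chipList (list2str chipList)

-- ===== LEMMAS AND PROOFS =====

-- Appending one fixed separator to every fragment and flattening is intercalating the
-- fragments plus a single trailing separator (absent when there are no fragments).
theorem flatMap_append_sep {α : Type} (f : α → List Char) (sep : List Char) (L : List α) :
    L.flatMap (fun c => f c ++ sep) = List.intercalate sep (L.map f) ++ (if L = [] then [] else sep) := by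
  induction L with
  | nil => simp [List.intercalate]
  | cons a L ih =>
    cases L with
    | nil => simp [List.intercalate]
    | cons b t =>
      simp only [List.flatMap_cons] at ih ⊢
      rw [ih]
      simp [List.intercalate]

-- Ordered dedup of c :: l is c followed by the ordered dedup of l with all c's removed.
theorem ofList_cons_filter (c : String) (l : List String) :
    PySem.Set.ofList (c :: l) = c :: PySem.Set.ofList (l.filter (fun x => x != c)) := by
  have key : ∀ (m s : List String), (∀ x ∈ m, x ≠ c) →
      List.foldl PySem.Set.add (c :: s) m = c :: List.foldl PySem.Set.add s m := by
    intro m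
    induction m with
    | nil => intro s _; rfl
    | cons a t ih =>
      intro s h
      have ha : a ≠ c := h a (by simp)
      have hadd : PySem.Set.add (c :: s) a = c :: PySem.Set.add s a := by
        simp [PySem.Set.add, PySem.Set.contains, ha]
        split_ifs <;> simp
      simp only [List.foldl_cons, hadd]
      exact ih _ (fun x hx => h x (by simp [hx]))
  have drop : ∀ (m s : List String), c ∈ s →
      List.foldl PySem.Set.add s m = List.foldl PySem.Set.add s (m.filter (fun x => x != c)) := by
    intro m
    induction m with
    | nil => intro s _; rfl
    | cons a t ih =>
      intro s hs
      by_cases hac : a = c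
      · subst hac
        have : PySem.Set.add s a = s := by
          simp [PySem.Set.add, PySem.Set.contains, hs]
        simp only [List.filter_cons, bne_self_eq_false, List.foldl_cons, this]
        exact ih s hs
      · have : (a != c) = true := by simp [bne_iff_ne, hac]
        simp only [List.filter_cons, this, List.foldl_cons]
        exact ih _ (by simp [PySem.Set.add]; split_ifs <;> simp [hs])
  show List.foldl PySem.Set.add PySem.Set.empty (c :: l)
      = c :: List.foldl PySem.Set.add PySem.Set.empty (l.filter (fun x => x != c))
  simp only [List.foldl_cons]
  have h0 : PySem.Set.add PySem.Set.empty c = [c] := rfl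
  rw [h0, drop l [c] (by simp), key _ _ (fun x hx => by
    have := List.of_mem_filter hx
    simpa [bne_iff_ne] using this)]
  rfl

theorem count_add_filter_length (c : String) (l : List String) :
    l.count c + (l.filter (fun x => x != c)).length = l.length := by
  induction l with
  | nil => simp
  | cons a t ih =>
    by_cases h : a = c
    · subst h; simp; omega
    · have hb : (a != c) = true := by simp [bne_iff_ne, h]
      have hb2 : (a == c) = false := by simp [beq_eq_false_iff_ne, h]
      simp [List.count_cons, hb, hb2]; omega

theorem count_filter_ne (x c : String) (l : List String) (h : x ≠ c) :
    (l.filter (fun y => y != c)).count x = l.count x := by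
  induction l with
  | nil => rfl
  | cons a t ih =>
    by_cases hac : a = c
    · subst hac
      simp [List.count_cons, ih]
      intro he; exact absurd he.symm h
    · have : (a != c) = true := by simp [bne_iff_ne, hac]
      simp [this, List.count_cons, ih]

-- B's fragment list is exactly the per-distinct-color fragments (distinct colors in
-- first-appearance order, counts over the full list), viewed as char lists.
theorem chipParts_eq (l : List String) :
    (chipParts l).map String.toList = (PySem.Set.ofList l).map
      (fun c => PySem.Int.toChars ((l.count c : Int)) ++ " ".toList ++ c.toList ++ " chips".toList) := by
  induction hn : l.length using Nat.strong_induction_on generalizing l with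
  | _ n ih =>
  cases l with
  | nil => simp [chipParts, PySem.Set.ofList]
  | cons color tl =>
    have hrest : (color :: tl).filter (fun c => c != color) = tl.filter (fun c => c != color) := by
      simp
    set rest := tl.filter (fun c => c != color) with hrestdef
    have hlen : rest.length ≤ tl.length := List.length_filter_le _ _
    have ihr := ih rest.length (by subst hn; simp only [List.length_cons]; omega) rest rfl
    rw [chipParts, hrest, ofList_cons_filter]
    simp only [List.map_cons, String.toList_ofList, ihr]
    -- counts of the remaining distinct colors agree on the full list and on rest
    have hmap : (PySem.Set.ofList rest).map
        (fun c => PySem.Int.toChars ((rest.count c : Int)) ++ " ".toList ++ c.toList ++ " chips".toList)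
        = (PySem.Set.ofList rest).map
        (fun c => PySem.Int.toChars (((color :: tl).count c : Int)) ++ " ".toList ++ c.toList ++ " chips".toList) := by
      apply List.map_congr_left
      intro x hx
      have hxm : x ∈ rest := (PySem.Set.mem_ofList _ _).mp hx
      have hxne : x ≠ color := by
        have := List.of_mem_filter hxm
        simpa [bne_iff_ne] using this
      have h1 : rest.count x = tl.count x := count_filter_ne x color tl hxne
      have h2 : (color :: tl).count x = tl.count x := by
        simp [List.count_cons]
        intro he; exact absurd he.symm hxne
      rw [h1, h2]
    -- the head fragment: length difference = count of the head color
    have hcnt : (((color :: tl).length - ((color :: tl).filter (fun c => c != color)).length : Nat) : Int)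
        = ((color :: tl).count color : Int) := by
      have := count_add_filter_length color (color :: tl)
      have hle : ((color :: tl).filter (fun c => c != color)).length ≤ (color :: tl).length :=
        List.length_filter_le _ _
      omega
    rw [hrest] at hcnt
    rw [hcnt, hmap]

-- ===== VERDICT (by name: the statement is the Claim_ definition above) =====
theorem list2str_spec : Claim_equal_list2str := by
  intro chipList _
  unfold Spec_list2str
  have halt : list2str_alt chipList
      = String.ofList (List.intercalate ", ".toList ((PySem.Set.ofList chipList).map
        (fun c => PySem.Int.toChars ((chipList.count c : Int)) ++ " ".toList ++ c.toList ++ " chips".toList))) := by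
    unfold list2str_alt
    have h1 : (PySem.Str.join ", " (chipParts chipList)).toList
        = PySem.Chars.join ", ".toList ((chipParts chipList).map String.toList) := by
      simp [PySem.Str.toList_join]
    rw [← (String.ofList_toList : String.ofList (String.toList (PySem.Str.join ", " (chipParts chipList))) = _), h1, chipParts_eq]
    simp [PySem.Chars.join, List.intercalate]
  rw [halt]
  unfold list2str
  simp only [PySem.Dict.foldl_insert_getD_add_one_eq_counter, PySem.Dict.items_counter]
  have hre : (fun (s : List Char) (p : String × Int) =>
      s ++ PySem.Int.toChars p.2 ++ " ".toList ++ p.1.toList ++ " chips, ".toList)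
      = (fun s p => s ++ (PySem.Int.toChars p.2 ++ " ".toList ++ p.1.toList ++ " chips, ".toList)) := by
    funext s p; simp [List.append_assoc]
  rw [hre, PySem.List.foldl_append_eq_flatMap, List.flatMap_map]
  set U := PySem.Set.ofList chipList with hU
  have hch : (fun c : String => (PySem.Int.toChars ((chipList.count c : Int))
      ++ " ".toList ++ c.toList ++ " chips, ".toList))
      = (fun c => (PySem.Int.toChars ((chipList.count c : Int))
      ++ " ".toList ++ c.toList ++ " chips".toList) ++ ", ".toList) := by
    funext c; simp [List.append_assoc]
  simp only [hch]
  rw [flatMap_append_sep]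
  simp only [List.nil_append]
  by_cases h : U = []
  · simp [h, List.intercalate]
    decide
  · rw [if_neg h]
    congr 1
    rw [PySem.List.slice_to_neg_ofNat _ 2 (by omega)]
    have h2 : (", ".toList : List Char).length = 2 := rfl
    rw [List.length_append, h2, Nat.add_sub_cancel, List.take_left]
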